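-- pv_equiv track=rewrite | github.com/mckk12/University | SI/P2/z1.py | opt_dist_single
-- ===== SOURCE A (Python) =====
-- def opt_dist_single(seq, num):
--     changes = len(seq) + 1
--     idx = 0
--     for i in range(len(seq) - num + 1):
--         curr = seq[i:i+num]
--         rest = seq[:i] + seq[i+num:]
--         if (curr.count(0) + rest.count(1)< changes):
--             changes = curr.count(0) + rest.count(1)
--             idx = i
--     return changes, idx
-- ===== SOURCE B (Python) =====
-- def opt_dist_single(seq, num):
--     n = len(seq)
--     if num > n:
--         return n + 1, 0
--     total_ones = seq.count(1)
--     z = seq[:num].count(0)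
--     o = seq[:num].count(1)
--     best, idx = z + total_ones - o, 0
--     i = 1
--     for out_x, in_x in zip(seq, seq[num:]):
--         z += (in_x == 0) - (out_x == 0)
--         o += (in_x == 1) - (out_x == 1)
--         c = z + total_ones - o
--         if c < best:
--             best, idx = c, i
--         i += 1
--     return best, idx
-- ===== Notes on version B (the rewrite author's own statement) =====
-- stated objective: faster
-- what changed: Replaced the per-position slicing and counting (each iteration builds and counts two slices of the whole list) with a single sliding-window pass keeping running zero/one counts, using changes = zeros_in_window + total_ones - ones_in_window.
-- outside the precondition, e.g. on opt_dist_single([0, 0], -1): A returns (0, 1), B returns (1, 0)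
import Mathlib
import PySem

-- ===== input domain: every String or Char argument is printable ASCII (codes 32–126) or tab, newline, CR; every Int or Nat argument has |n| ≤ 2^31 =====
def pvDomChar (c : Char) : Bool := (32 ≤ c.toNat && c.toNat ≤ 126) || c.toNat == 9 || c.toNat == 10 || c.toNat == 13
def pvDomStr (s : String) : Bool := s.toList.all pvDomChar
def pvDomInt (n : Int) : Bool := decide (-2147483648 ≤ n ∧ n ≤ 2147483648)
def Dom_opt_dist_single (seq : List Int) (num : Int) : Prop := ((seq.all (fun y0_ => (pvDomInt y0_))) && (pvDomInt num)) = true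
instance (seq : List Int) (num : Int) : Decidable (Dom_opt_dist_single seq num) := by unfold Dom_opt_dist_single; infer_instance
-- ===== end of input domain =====

-- B replaces A's per-position slice-and-count scan by a single sliding-window pass with running counts (asymptotically faster).

-- ===== PORT A =====
def opt_dist_single (seq : List Int) (num : Int) : Int × Int :=
  (PySem.List.pyRange 0 ((seq.length : Int) - num + 1) 1).foldl
    (fun st i =>
      let curr := PySem.List.slice seq (some i) (some (i + num))
      let rest := PySem.List.slice seq none (some i) ++ PySem.List.slice seq (some (i + num)) none
      if ((PySem.List.count curr 0 : Int) + (PySem.List.count rest 1 : Int) < st.1) then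
        ((PySem.List.count curr 0 : Int) + (PySem.List.count rest 1 : Int), i)
      else st)
    ((seq.length : Int) + 1, 0)

-- ===== PORT B =====
def opt_dist_single_alt (seq : List Int) (num : Int) : Int × Int :=
  if num > (seq.length : Int) then ((seq.length : Int) + 1, 0)
  else
    let totalOnes : Int := PySem.List.count seq 1
    let z0 : Int := PySem.List.count (PySem.List.slice seq none (some num)) 0
    let o0 : Int := PySem.List.count (PySem.List.slice seq none (some num)) 1
    let res := (seq.zip (PySem.List.slice seq (some num) none)).foldl
      (fun st p =>
        let z := st.1 + ((if p.2 = 0 then (1:Int) else 0) - (if p.1 = 0 then (1:Int) else 0))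
        let o := st.2.1 + ((if p.2 = 1 then (1:Int) else 0) - (if p.1 = 1 then (1:Int) else 0))
        let c := z + totalOnes - o
        if c < st.2.2.1 then (z, o, c, st.2.2.2.2, st.2.2.2.2 + 1)
        else (z, o, st.2.2.1, st.2.2.2.1, st.2.2.2.2 + 1))
      (z0, o0, z0 + totalOnes - o0, 0, 1)
    (res.2.2.1, res.2.2.2.1)

-- ===== PRECONDITION & SPEC =====
-- Pre_ excludes negative window lengths, outside the task's natural domain: A's value there is an
-- artefact of Python's negative slicing (empty window plus a wrap-around 'rest'), which B's sliding
-- window does not reproduce.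
def Pre_opt_dist_single (seq : List Int) (num : Int) : Prop := 0 ≤ num
instance (seq : List Int) (num : Int) : Decidable (Pre_opt_dist_single seq num) := by unfold Pre_opt_dist_single; infer_instance
def pvWitness_opt_dist_single : List Int × Int := ([1, 0, 1, 0], 2)

def Spec_opt_dist_single (seq : List Int) (num : Int) (out : Int × Int) : Prop := out = opt_dist_single_alt seq num
instance (seq : List Int) (num : Int) (out : Int × Int) : Decidable (Spec_opt_dist_single seq num out) := by unfold Spec_opt_dist_single; infer_instance

-- ===== CLAIM (what is proved, stated in full; the proofs are below) =====
def Claim_equal_opt_dist_single : Prop := ∀ (seq : List Int) (num : Int), Dom_opt_dist_single seq num → Pre_opt_dist_single seq num → Spec_opt_dist_single seq num (opt_dist_single seq num)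

-- ===== LEMMAS AND PROOFS =====

/-- count of value `v` in the first `m` elements, as an `Int`. -/
def cnt (l : List Int) (v : Int) (m : Nat) : Int := ((l.take m).count v : Int)

/-- the cost of placing the window at position `j` (window length `k`). -/
def cand (l : List Int) (k : Nat) (j : Nat) : Int :=
  (cnt l 0 (j + k) - cnt l 0 j) + (l.count 1 : Int) - (cnt l 1 (j + k) - cnt l 1 j)

/-- reference minimum scan over candidate positions `lo, lo+1, …, lo+m-1`. -/
def mscan (l : List Int) (k lo m : Nat) (st : Int × Int) : Int × Int :=
  (List.range m).foldl
    (fun st t => if cand l k (lo + t) < st.1 then (cand l k (lo + t), ((lo + t : Nat) : Int)) else st) st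

lemma cnt_succ (l : List Int) (v : Int) (m : Nat) (h : m < l.length) :
    cnt l v (m + 1) = cnt l v m + (if l[m] = v then 1 else 0) := by
  rw [cnt, List.take_add_one, List.getElem?_eq_getElem h]
  simp only [Option.toList_some, List.count_append, List.count_singleton]
  by_cases hv : l[m] = v <;> simp [cnt, hv]

lemma cnt_window (l : List Int) (v : Int) (j k : Nat) :
    (((l.drop j).take k).count v : Int) = cnt l v (j + k) - cnt l v j := by
  have h : l.take (j + k) = l.take j ++ (l.drop j).take k := List.take_add
  simp [cnt, h, List.count_append]

lemma cnt_drop (l : List Int) (v : Int) (m : Nat) :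
    ((l.drop m).count v : Int) = (l.count v : Int) - cnt l v m := by
  have h : l.take m ++ l.drop m = l := List.take_append_drop m l
  have := congrArg (List.count v) h
  rw [List.count_append] at this
  simp [cnt, ← this]

lemma cand_le (l : List Int) (k : Nat) (hk : k ≤ l.length) :
    cand l k 0 ≤ (l.length : Int) := by
  have h0 : cand l k 0 = ((l.take k).count 0 : Int) + ((l.drop k).count 1 : Int) := by
    rw [cnt_drop]
    simp [cand, cnt]
    ring
  have h1 : (l.take k).count 0 ≤ (l.take k).length := List.count_le_length
  have h2 : (l.drop k).count 1 ≤ (l.drop k).length := List.count_le_length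
  have h3 : (l.take k).length = k := by simp [hk]
  have h4 : (l.drop k).length = l.length - k := by simp
  rw [h0]
  omega

lemma mscan_shift (l : List Int) (k lo m : Nat) (st : Int × Int) :
    (List.range m).foldl
      (fun st t => if cand l k (lo + (t + 1)) < st.1 then (cand l k (lo + (t + 1)), ((lo + (t + 1) : Nat) : Int)) else st) st
      = mscan l k (lo + 1) m st := by
  unfold mscan
  apply PySem.List.foldl_congr_mem
  intro acc x _
  have h : lo + (x + 1) = lo + 1 + x := by omega
  rw [h]

lemma A_eq (l : List Int) (k : Nat) (hk : k ≤ l.length) :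
    opt_dist_single l (k : Int) = mscan l k 0 (l.length - k + 1) ((l.length : Int) + 1, 0) := by
  unfold opt_dist_single mscan
  rw [PySem.List.pyRange_one]
  have hn : (((l.length : Int) - (k : Int) + 1) - 0).toNat = l.length - k + 1 := by omega
  rw [hn, List.foldl_map]
  apply PySem.List.foldl_congr_mem
  intro acc t ht
  have htm : t ≤ l.length - k := by
    have := List.mem_range.mp ht; omega
  have hcast : (0 : Int) + (t : Int) = ((t : Nat) : Int) := by ring
  have hcurr : PySem.List.slice l (some ((0:Int) + t)) (some (((0:Int) + t) + k)) = (l.drop t).take k := by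
    rw [hcast]
    have : ((t : Int) + (k : Int)) = (((t + k : Nat)) : Int) := by push_cast; ring
    rw [this, PySem.List.slice_natCast]
    congr 1
    omega
  have hrest1 : PySem.List.slice l none (some ((0:Int) + t)) = l.take t := by
    rw [hcast, PySem.List.slice_to_natCast]
  have hrest2 : PySem.List.slice l (some (((0:Int) + t) + k)) none = l.drop (t + k) := by
    rw [hcast]
    have : ((t : Int) + (k : Int)) = (((t + k : Nat)) : Int) := by push_cast; ring
    rw [this, PySem.List.slice_from_natCast]
  simp only [hcurr, hrest1, hrest2, PySem.List.count_eq, List.count_append]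
  have hval : (((l.drop t).take k).count 0 : Int) + (((l.take t).count 1 : Int) + ((l.drop (t + k)).count 1 : Int))
      = cand l k t := by
    rw [cnt_window, cnt_drop]
    simp [cand, cnt]
    ring
  push_cast
  rw [hval]
  simp

lemma B_fold (l : List Int) (k : Nat) :
    ∀ (m j : Nat) (b x : Int), j + k + m = l.length →
    ((l.drop j).zip (l.drop (j + k))).foldl
      (fun st p =>
        let z := st.1 + ((if p.2 = 0 then (1:Int) else 0) - (if p.1 = 0 then (1:Int) else 0))
        let o := st.2.1 + ((if p.2 = 1 then (1:Int) else 0) - (if p.1 = 1 then (1:Int) else 0))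
        let c := z + (l.count 1 : Int) - o
        if c < st.2.2.1 then (z, o, c, st.2.2.2.2, st.2.2.2.2 + 1)
        else (z, o, st.2.2.1, st.2.2.2.1, st.2.2.2.2 + 1))
      (cnt l 0 (j + k) - cnt l 0 j, cnt l 1 (j + k) - cnt l 1 j, b, x, (j : Int) + 1)
      = (cnt l 0 l.length - cnt l 0 (j + m), cnt l 1 l.length - cnt l 1 (j + m),
         (mscan l k (j + 1) m (b, x)).1, (mscan l k (j + 1) m (b, x)).2,
         ((j + m : Nat) : Int) + 1) := by
  intro m
  induction m with
  | zero =>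
    intro j b x hj
    have hjk : j + k = l.length := by omega
    have hdrop : l.drop (j + k) = [] := List.drop_eq_nil_of_le (by omega)
    simp [mscan, hjk]
  | succ m ih =>
    intro j b x hj
    have hjn : j < l.length := by omega
    have hjkn : j + k < l.length := by omega
    have hd1 : l.drop j = l[j] :: l.drop (j + 1) := List.drop_eq_getElem_cons hjn
    have hd2 : l.drop (j + k) = l[j + k] :: l.drop (j + k + 1) := List.drop_eq_getElem_cons hjkn
    rw [hd1, hd2, List.zip_cons_cons, List.foldl_cons]
    have hz : cnt l 0 (j + k) - cnt l 0 j
        + ((if l[j + k] = 0 then (1:Int) else 0) - (if l[j] = 0 then (1:Int) else 0))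
        = cnt l 0 (j + 1 + k) - cnt l 0 (j + 1) := by
      rw [show j + 1 + k = (j + k) + 1 by omega, cnt_succ _ _ _ hjkn, cnt_succ _ _ _ hjn]
      ring
    have ho : cnt l 1 (j + k) - cnt l 1 j
        + ((if l[j + k] = 1 then (1:Int) else 0) - (if l[j] = 1 then (1:Int) else 0))
        = cnt l 1 (j + 1 + k) - cnt l 1 (j + 1) := by
      rw [show j + 1 + k = (j + k) + 1 by omega, cnt_succ _ _ _ hjkn, cnt_succ _ _ _ hjn]
      ring
    have hc : cnt l 0 (j + 1 + k) - cnt l 0 (j + 1) + (l.count 1 : Int)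
        - (cnt l 1 (j + 1 + k) - cnt l 1 (j + 1)) = cand l k (j + 1) := by
      rw [cand]
    have hdk : l.drop (j + k + 1) = l.drop (j + 1 + k) := by rw [show j + k + 1 = j + 1 + k by omega]
    simp only [hz, ho, hc, hdk]
    -- right-hand side: peel the first candidate off the mscan
    have hrhs : ∀ st : Int × Int, mscan l k (j + 1) (m + 1) st
        = mscan l k (j + 2) m
            (if cand l k (j + 1) < st.1 then (cand l k (j + 1), ((j + 1 : Nat) : Int)) else st) := by
      intro st
      rw [mscan, List.range_succ_eq_map, List.foldl_cons, List.foldl_map]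
      have h0 : j + 1 + 0 = j + 1 := by omega
      rw [h0]
      have := mscan_shift l k (j + 1) m
        (if cand l k (j + 1) < st.1 then (cand l k (j + 1), ((j + 1 : Nat) : Int)) else st)
      simp only [Nat.succ_eq_add_one] at *
      rw [← this]
    rw [hrhs (b, x)]
    by_cases hcb : cand l k (j + 1) < b
    · simp only [if_pos hcb]
      have := ih (j + 1) (cand l k (j + 1)) ((j : Int) + 1) (by omega)
      have hcast : ((j + 1 : Nat) : Int) = (j : Int) + 1 := by push_cast; ring
      rw [hcast] at this ⊢
      rw [this]
      have hjm : j + 1 + m = j + (m + 1) := by omega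
      rw [hjm]
    · simp only [if_neg hcb]
      have := ih (j + 1) b x (by omega)
      have hcast : ((j + 1 : Nat) : Int) = (j : Int) + 1 := by push_cast; ring
      rw [hcast] at this
      rw [this]
      have hjm : j + 1 + m = j + (m + 1) := by omega
      rw [hjm]

lemma mscan_first (l : List Int) (k : Nat) (hk : k ≤ l.length) :
    mscan l k 0 (l.length - k + 1) ((l.length : Int) + 1, 0)
      = mscan l k 1 (l.length - k) (cand l k 0, 0) := by
  rw [mscan, List.range_succ_eq_map, List.foldl_cons, List.foldl_map]
  have h0 : cand l k (0 + 0) < (l.length : Int) + 1 := by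
    have := cand_le l k hk
    simp only [Nat.add_zero]
    omega
  rw [if_pos h0]
  have := mscan_shift l k 0 (l.length - k) (cand l k (0 + 0), ((0 + 0 : Nat) : Int))
  simp only [Nat.succ_eq_add_one, Nat.zero_add, Nat.cast_zero] at this ⊢
  rw [← this]

-- ===== VERDICT (by name: the statement is the Claim_ definition above) =====
theorem opt_dist_single_spec : Claim_equal_opt_dist_single := by
  intro seq num _ hpre
  have hpre' : 0 ≤ num := hpre
  unfold Spec_opt_dist_single
  by_cases hbig : (seq.length : Int) < num
  · unfold opt_dist_single opt_dist_single_alt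
    rw [PySem.List.pyRange_one_eq_nil (by omega)]
    rw [if_pos (by omega)]
    rfl
  · obtain ⟨k, hk⟩ : ∃ k : Nat, num = (k : Int) := ⟨num.toNat, by omega⟩
    subst hk
    have hkn : k ≤ seq.length := by omega
    rw [A_eq seq k hkn, mscan_first seq k hkn]
    unfold opt_dist_single_alt
    rw [if_neg (by omega)]
    simp only [PySem.List.count_eq, PySem.List.slice_to_natCast, PySem.List.slice_from_natCast]
    have hfold := B_fold seq k (seq.length - k) 0
      ((List.count 0 (seq.take k) : Int) + (List.count 1 seq : Int) - (List.count 1 (seq.take k) : Int))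
      0 (by omega)
    have hz0 : cnt seq 0 (0 + k) - cnt seq 0 0 = (List.count 0 (seq.take k) : Int) := by
      simp [cnt]
    have ho0 : cnt seq 1 (0 + k) - cnt seq 1 0 = (List.count 1 (seq.take k) : Int) := by
      simp [cnt]
    have hi0 : ((0 : Nat) : Int) + 1 = (1 : Int) := by norm_num
    have hdrop0 : seq.drop 0 = seq := List.drop_zero
    have hdk : (0 : Nat) + k = k := by omega
    rw [hz0, ho0, hi0, hdrop0, hdk] at hfold
    rw [hfold]
    have hb : (List.count 0 (seq.take k) : Int) + (List.count 1 seq : Int) - (List.count 1 (seq.take k) : Int)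
        = cand seq k 0 := by
      simp [cand, cnt]
    rw [hb]
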